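-- pv_equiv track=rewrite | github.com/near/nayduck | ui/ui_db.py | history_stats
-- ===== SOURCE A (Python) =====
-- def history_stats(history):
--     res = {"PASSED": 0, "FAILED": 0, "OTHER": 0}
--     for h in history:
--         if h["status"] == "PASSED":
--             res["PASSED"] += 1
--         elif h["status"] == "FAILED" or h["status"] == "BUILD FAILED" or h["status"] == "TIMEOUT":
--             res["FAILED"] += 1
--         else:
--             res["OTHER"] += 1
--     return res
-- ===== SOURCE B (Python) =====
-- def history_stats(history):
--     # Tally raw statuses once, then combine by arithmetic; OTHER = total - PASSED - FAILED.
--     c = {}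
--     for h in history:
--         s = h["status"]
--         c[s] = c.get(s, 0) + 1
--     passed = c.get("PASSED", 0)
--     failed = c.get("FAILED", 0) + c.get("BUILD FAILED", 0) + c.get("TIMEOUT", 0)
--     return {"PASSED": passed, "FAILED": failed, "OTHER": len(history) - passed - failed}
-- ===== Notes on version B (the rewrite author's own statement) =====
-- stated objective: alternative
-- what changed: Replaces per-element three-way branching into a fixed result dict by a one-pass frequency tally of raw status strings followed by arithmetic combination (OTHER computed by subtraction from the total).
import Mathlib
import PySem

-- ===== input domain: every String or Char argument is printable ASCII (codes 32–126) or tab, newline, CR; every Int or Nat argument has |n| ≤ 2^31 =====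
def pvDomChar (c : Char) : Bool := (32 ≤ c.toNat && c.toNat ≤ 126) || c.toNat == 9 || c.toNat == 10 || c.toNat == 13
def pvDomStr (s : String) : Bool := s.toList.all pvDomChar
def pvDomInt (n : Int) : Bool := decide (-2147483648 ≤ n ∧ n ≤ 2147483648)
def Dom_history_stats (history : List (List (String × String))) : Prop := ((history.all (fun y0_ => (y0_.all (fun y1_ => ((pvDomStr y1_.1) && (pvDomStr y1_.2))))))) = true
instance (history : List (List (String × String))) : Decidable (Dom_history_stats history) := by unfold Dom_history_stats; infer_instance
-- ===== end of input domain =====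

-- B replaces A's per-element three-way branching into a fixed result dict by a one-pass
-- frequency tally of raw status strings followed by arithmetic combination (alternative, same cost).


-- ===== PORT A =====
-- h["status"]: first-match lookup; Pre_ guarantees the key is present (the "" default is never used inside Pre_)
def pvStat (h : List (String × String)) : String := (PySem.Dict.mk h).getD "status" ""

def history_stats (history : List (List (String × String))) : List (String × Int) :=
  (history.foldl
    (fun res h =>
      if pvStat h == "PASSED" then res.modify "PASSED" 0 (· + 1)
      else if pvStat h == "FAILED" || pvStat h == "BUILD FAILED" || pvStat h == "TIMEOUT" then
        res.modify "FAILED" 0 (· + 1)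
      else res.modify "OTHER" 0 (· + 1))
    (PySem.Dict.mk [("PASSED", 0), ("FAILED", 0), ("OTHER", 0)])).items

-- ===== PORT B =====
def history_stats_alt (history : List (List (String × String))) : List (String × Int) :=
  let c := history.foldl (fun c h => let s := pvStat h; c.insert s (c.getD s 0 + 1)) PySem.Dict.empty
  let passed := c.getD "PASSED" 0
  let failed := c.getD "FAILED" 0 + c.getD "BUILD FAILED" 0 + c.getD "TIMEOUT" 0
  [("PASSED", passed), ("FAILED", failed), ("OTHER", (history.length : Int) - passed - failed)]

-- ===== PRECONDITION & SPEC =====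
-- Pre_ excludes histories with an entry lacking the "status" key, on which Python A raises KeyError.
def Pre_history_stats (history : List (List (String × String))) : Prop :=
  ∀ h ∈ history, (PySem.Dict.mk h).contains "status" = true
instance (history : List (List (String × String))) : Decidable (Pre_history_stats history) := by
  unfold Pre_history_stats; infer_instance
def pvWitness_history_stats : (List (List (String × String))) :=
  [[("status", "PASSED")], [("status", "TIMEOUT")], [("status", "weird")]]
def Spec_history_stats (history : List (List (String × String))) (out : List (String × Int)) : Prop := out = history_stats_alt history
instance (history : List (List (String × String))) (out : List (String × Int)) : Decidable (Spec_history_stats history out) := by unfold Spec_history_stats; infer_instance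

-- ===== CLAIM (what is proved, stated in full; the proofs are below) =====
def Claim_equal_history_stats : Prop := ∀ (history : List (List (String × String))), Dom_history_stats history → Pre_history_stats history → Spec_history_stats history (history_stats history)

-- ===== LEMMAS AND PROOFS =====

-- A's loop, started from the three-key dict with values p f o, ends at the three-key dict
-- whose values are bumped by the respective status counts.
theorem history_stats_foldA (l : List (List (String × String))) (p f o : Int) :
    l.foldl
      (fun res h =>
        if pvStat h == "PASSED" then res.modify "PASSED" 0 (· + 1)
        else if pvStat h == "FAILED" || pvStat h == "BUILD FAILED" || pvStat h == "TIMEOUT" then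
          res.modify "FAILED" 0 (· + 1)
        else res.modify "OTHER" 0 (· + 1))
      (PySem.Dict.mk [("PASSED", p), ("FAILED", f), ("OTHER", o)])
    = PySem.Dict.mk
        [("PASSED", p + ((l.map pvStat).count "PASSED" : Int)),
         ("FAILED", f + (((l.map pvStat).count "FAILED" : Int)
            + ((l.map pvStat).count "BUILD FAILED" : Int)
            + ((l.map pvStat).count "TIMEOUT" : Int))),
         ("OTHER", o + ((l.length : Int)
            - ((l.map pvStat).count "PASSED" : Int)
            - (((l.map pvStat).count "FAILED" : Int)
               + ((l.map pvStat).count "BUILD FAILED" : Int)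
               + ((l.map pvStat).count "TIMEOUT" : Int))))] := by
  induction l generalizing p f o with
  | nil => simp
  | cons h t ih =>
    simp only [List.foldl_cons, List.map_cons, List.length_cons]
    by_cases hp : pvStat h = "PASSED"
    · have hstep : (PySem.Dict.mk [("PASSED", p), ("FAILED", f), ("OTHER", o)]).modify "PASSED" 0 (· + 1)
          = PySem.Dict.mk [("PASSED", p + 1), ("FAILED", f), ("OTHER", o)] := by
        apply PySem.Dict.ext
        simp [PySem.Dict.modify, PySem.Dict.insert, PySem.Dict.getD, PySem.Dict.get?,
          PySem.Dict.contains]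
      have hcond : (pvStat h == "PASSED") = true := by simp [hp]
      rw [if_pos hcond, hstep, ih]
      simp [hp]
      try ring_nf
      try simp
    · by_cases hf : pvStat h = "FAILED" ∨ pvStat h = "BUILD FAILED" ∨ pvStat h = "TIMEOUT"
      · have hcond : ¬ ((pvStat h == "PASSED") = true) := by simp [hp]
        have hcond2 : (pvStat h == "FAILED" || pvStat h == "BUILD FAILED" || pvStat h == "TIMEOUT") = true := by
          rcases hf with h1 | h1 | h1 <;> simp [h1]
        have hstep : (PySem.Dict.mk [("PASSED", p), ("FAILED", f), ("OTHER", o)]).modify "FAILED" 0 (· + 1)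
            = PySem.Dict.mk [("PASSED", p), ("FAILED", f + 1), ("OTHER", o)] := by
          apply PySem.Dict.ext
          simp [PySem.Dict.modify, PySem.Dict.insert, PySem.Dict.getD, PySem.Dict.get?,
            PySem.Dict.contains]
        rw [if_neg hcond, if_pos hcond2, hstep, ih]
        rcases hf with h1 | h1 | h1 <;>
          · simp [h1, hp]
            try ring_nf
            try simp
      · push Not at hf
        have hcond : ¬ ((pvStat h == "PASSED") = true) := by simp [hp]
        have hcond2 : ¬ ((pvStat h == "FAILED" || pvStat h == "BUILD FAILED" || pvStat h == "TIMEOUT") = true) := by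
          simp [hf.1, hf.2.1, hf.2.2]
        have hstep : (PySem.Dict.mk [("PASSED", p), ("FAILED", f), ("OTHER", o)]).modify "OTHER" 0 (· + 1)
            = PySem.Dict.mk [("PASSED", p), ("FAILED", f), ("OTHER", o + 1)] := by
          apply PySem.Dict.ext
          simp [PySem.Dict.modify, PySem.Dict.insert, PySem.Dict.getD, PySem.Dict.get?,
            PySem.Dict.contains]
        rw [if_neg hcond, if_neg hcond2, hstep, ih]
        simp [hp, hf.1, hf.2.1, hf.2.2]
        try ring_nf
        try simp

theorem history_stats_foldB (l : List (List (String × String))) (v : String) :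
    (l.foldl (fun c h => let s := pvStat h; c.insert s (c.getD s 0 + 1)) PySem.Dict.empty).getD v 0
    = ((l.map pvStat).count v : Int) := by
  show (List.foldl (fun (c : PySem.Dict String Int) h => c.insert (pvStat h) (c.getD (pvStat h) 0 + 1)) PySem.Dict.empty l).getD v 0 = _
  rw [← List.foldl_map (f := pvStat) (g := fun c s => PySem.Dict.insert c s (c.getD s 0 + 1))]
  rw [PySem.Dict.getD_foldl_insert_add_one]
  simp

-- ===== VERDICT (by name: the statement is the Claim_ definition above) =====
theorem history_stats_spec : Claim_equal_history_stats := by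
  intro history _ _
  unfold Spec_history_stats history_stats history_stats_alt
  rw [history_stats_foldA]
  simp only [history_stats_foldB]
  simp
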